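-- pv_equiv track=rewrite | github.com/tiendm1991/python | DivideAndConquer/countZeroes.py | firstZero
-- ===== SOURCE A (Python) =====
-- def firstZero(a, left, right):
--     if a[right] == 1:
--         return -1
--     if right - left == 1:
--         return right
--     mid = (left + right + 1) // 2
--     if a[mid] == 0:
--         return firstZero(a, left, mid)
--     else:
--         return firstZero(a, mid, right)
-- ===== SOURCE B (Python) =====
-- def firstZero(a, left, right):
--     if a[right] == 1:
--         return -1
--     while right - left != 1:
--         mid = (left + right + 1) // 2
--         if a[mid] == 0:
--             right = mid
--         else:
--             left = mid
--     return right
-- ===== Notes on version B (the rewrite author's own statement) =====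
-- stated objective: idiomatic
-- what changed: The recursive halving is rewritten as an iterative binary-search loop over an explicit (left,right) interval state with the a[right]==1 guard hoisted out of the iteration (in the recursion it can only fire on the initial call); Pre_ excludes inputs where right is out of range, or where a[right] != 1 and right <= left (infinite recursion) or left+1 < -len(a) (the midpoints normally leave the index range), though on rare value patterns such a wrapped path stays in range and both programs return the same value.
-- outside the precondition, e.g. on firstZero([0, 0, 0, 5], -6, 3): A returns 0, B returns 0
import Mathlib
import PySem

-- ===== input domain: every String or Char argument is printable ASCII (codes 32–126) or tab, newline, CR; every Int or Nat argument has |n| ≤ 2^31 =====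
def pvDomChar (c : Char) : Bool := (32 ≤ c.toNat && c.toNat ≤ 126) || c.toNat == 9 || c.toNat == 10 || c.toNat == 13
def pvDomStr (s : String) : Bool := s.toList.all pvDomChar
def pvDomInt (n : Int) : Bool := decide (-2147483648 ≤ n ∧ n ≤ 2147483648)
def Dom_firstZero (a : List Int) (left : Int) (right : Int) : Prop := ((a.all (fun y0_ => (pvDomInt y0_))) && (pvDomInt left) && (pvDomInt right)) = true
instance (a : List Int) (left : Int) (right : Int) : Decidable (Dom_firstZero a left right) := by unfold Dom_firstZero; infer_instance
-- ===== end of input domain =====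

-- B: the recursive halving rewritten as an iterative binary-search loop over an
-- explicit (left,right) interval state, with the a[right]==1 guard hoisted out
-- of the iteration (idiomatic; same cost).

-- ===== PORT A =====
-- A's recursion, with a fuel counter as the totality guard (Pre_ excludes the
-- inputs on which the Python diverges or raises; the 0 results are IndexError/
-- fuel-exhaustion placeholders outside Pre_).
def firstZeroGo (a : List Int) : Nat → Int → Int → Int
  | 0, _, _ => 0
  | fuel+1, left, right =>
    match PySem.List.pyGet? a right with
    | none => 0
    | some v =>
      if v = 1 then -1
      else if right - left = 1 then right
      else
        let mid := PySem.Int.floordiv (left + right + 1) 2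
        match PySem.List.pyGet? a mid with
        | none => 0
        | some w =>
          if w = 0 then firstZeroGo a fuel left mid
          else firstZeroGo a fuel mid right

def firstZero (a : List Int) (left : Int) (right : Int) : Int :=
  firstZeroGo a ((right - left).toNat + 1) left right

-- ===== PORT B =====
-- one iteration of Source B's while loop on the interval state; `none` records an
-- IndexError (outside Pre_), and a finished interval (right-left = 1) is left
-- unchanged so that the bounded iteration below is a faithful while-loop port
def stepB (a : List Int) (s : Option (Int × Int)) : Option (Int × Int) :=
  s.bind fun (lr : Int × Int) =>
    if lr.2 - lr.1 = 1 then some lr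
    else
      (PySem.List.pyGet? a (PySem.Int.floordiv (lr.1 + lr.2 + 1) 2)).map fun w =>
        if w = 0 then (lr.1, PySem.Int.floordiv (lr.1 + lr.2 + 1) 2)
        else (PySem.Int.floordiv (lr.1 + lr.2 + 1) 2, lr.2)

def firstZero_alt (a : List Int) (left : Int) (right : Int) : Int :=
  match PySem.List.pyGet? a right with
  | none => 0
  | some v =>
    if v = 1 then -1
    else
      match (stepB a)^[(right - left).toNat + 1] (some (left, right)) with
      | some lr => lr.2
      | none => 0

-- ===== PRECONDITION & SPEC =====
-- Pre_ excludes inputs where right is out of range, or where a[right] != 1 and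
-- right <= left (infinite recursion) or left+1 < -len(a) (the midpoints normally
-- leave the index range); on rare value patterns such a wrapped path happens to
-- stay in range and both programs return the same value there.
def Pre_firstZero (a : List Int) (left : Int) (right : Int) : Prop :=
  -(a.length : Int) ≤ right ∧ right < a.length ∧
    (PySem.List.pyGet? a right = some 1 ∨ (left < right ∧ -(a.length : Int) ≤ left + 1))
instance (a : List Int) (left : Int) (right : Int) : Decidable (Pre_firstZero a left right) := by
  unfold Pre_firstZero; infer_instance

def pvWitness_firstZero : List Int × Int × Int := ([1, 1, 0, 0], 0, 3)

def Spec_firstZero (a : List Int) (left : Int) (right : Int) (out : Int) : Prop := out = firstZero_alt a left right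
instance (a : List Int) (left : Int) (right : Int) (out : Int) : Decidable (Spec_firstZero a left right out) := by unfold Spec_firstZero; infer_instance

-- ===== CLAIM (what is proved, stated in full; the proofs are below) =====
def Claim_equal_firstZero : Prop := ∀ (a : List Int) (left : Int) (right : Int), Dom_firstZero a left right → Pre_firstZero a left right → Spec_firstZero a left right (firstZero a left right)

-- ===== LEMMAS AND PROOFS =====

theorem stepB_done (a : List Int) (l r : Int) (h : r - l = 1) :
    stepB a (some (l, r)) = some (l, r) := by
  simp [stepB, h]

theorem stepB_none (a : List Int) : stepB a none = none := rfl

-- once the initial a[right]==1 guard has been passed, the value found at the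
-- current right index is never 1, so A's repeated guard never fires again and
-- A's recursion with fuel n computes what n iterations of B's loop body compute
theorem go_eq_iter (a : List Int) (fuel : Nat) :
    ∀ (left right v : Int), PySem.List.pyGet? a right = some v → v ≠ 1 →
      0 < right - left → right - left ≤ fuel →
      firstZeroGo a (fuel + 1) left right =
        (match (stepB a)^[fuel + 1] (some (left, right)) with
          | some lr => lr.2
          | none => 0) := by
  induction fuel with
  | zero =>
    intro l r v hv hv1 hpos hle
    have hr : r - l = 1 := by omega
    simp [firstZeroGo, hv, hv1, hr, stepB_done]
  | succ n ih =>
    intro l r v hv hv1 hpos hle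
    by_cases hbase : r - l = 1
    · have hfix : ∀ k, (stepB a)^[k] (some (l, r)) = some (l, r) :=
        fun k => Function.iterate_fixed (stepB_done a l r hbase) k
      simp [firstZeroGo, hv, hv1, hbase, hfix]
    · have hmid := PySem.Int.floordiv_two_mid_bounds (lo := l + 1) (hi := r) (by omega)
      have hmid' : l + 1 ≤ PySem.Int.floordiv (l + r + 1) 2 ∧
          PySem.Int.floordiv (l + r + 1) 2 ≤ r := by
        have : l + 1 + r = l + r + 1 := by ring
        simpa [this] using hmid
      have hmlt : PySem.Int.floordiv (l + r + 1) 2 < r := by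
        rcases lt_or_eq_of_le hmid'.2 with h | h
        · exact h
        · exfalso
          have := PySem.Int.floordiv_eq_iff_of_pos (a := l + r + 1) (b := 2) (q := r)
            (by omega) |>.mp h
          omega
      have hgo : firstZeroGo a (n + 1 + 1) l r =
          match PySem.List.pyGet? a r with
          | none => 0
          | some v =>
            if v = 1 then -1
            else if r - l = 1 then r
            else
              match PySem.List.pyGet? a (PySem.Int.floordiv (l + r + 1) 2) with
              | none => 0
              | some w =>
                if w = 0 then firstZeroGo a (n + 1) l (PySem.Int.floordiv (l + r + 1) 2)
                else firstZeroGo a (n + 1) (PySem.Int.floordiv (l + r + 1) 2) r := rfl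
      have hstep : stepB a (some (l, r)) =
          (PySem.List.pyGet? a (PySem.Int.floordiv (l + r + 1) 2)).map fun w =>
            if w = 0 then (l, PySem.Int.floordiv (l + r + 1) 2)
            else (PySem.Int.floordiv (l + r + 1) 2, r) := by
        simp [stepB, hbase]
      rw [Function.iterate_succ_apply, hstep, hgo]
      rw [hv]
      simp only [if_neg hv1, if_neg hbase]
      cases hm : PySem.List.pyGet? a (PySem.Int.floordiv (l + r + 1) 2) with
      | none =>
        have hfix : ∀ k, (stepB a)^[k] (none : Option (Int × Int)) = none :=
          fun k => Function.iterate_fixed (stepB_none a) k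
        simp [hfix]
      | some w =>
        by_cases hw : w = 0
        · have := ih l (PySem.Int.floordiv (l + r + 1) 2) 0 (hw ▸ hm) (by decide)
            (by omega) (by omega)
          simpa [hw] using this
        · have := ih (PySem.Int.floordiv (l + r + 1) 2) r v hv hv1 (by omega) (by omega)
          simpa [hw] using this

-- ===== VERDICT (by name: the statement is the Claim_ definition above) =====
theorem firstZero_spec : Claim_equal_firstZero := by
  intro a left right _ hpre
  unfold Spec_firstZero firstZero firstZero_alt
  cases hv : PySem.List.pyGet? a right with
  | none =>
    exfalso
    rcases hpre with ⟨hA, hB, _⟩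
    have h := (PySem.List.pyGet?_eq_none_iff (xs := a) (i := right)).mp hv
    simp [PySem.Raise.InRange] at h
    omega
  | some v =>
    by_cases h1 : v = 1
    · simp [firstZeroGo, hv, h1]
    · simp only [if_neg h1]
      rcases hpre with ⟨_, _, hcase⟩
      rcases hcase with hc | hc
      · rw [hv] at hc; exact absurd (Option.some.inj hc) h1
      · exact go_eq_iter a ((right - left).toNat) left right v hv h1 (by omega) (by omega)
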